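-- pv_equiv track=rewrite | github.com/martijnbentum/segment_audio_shiny_enigma | find_silence.py | segment_bounds
-- ===== SOURCE A (Python) =====
-- def segment_bounds(mask):
--     # Find contiguous silent regions as (start_frame, end_frame)
--     starts, ends = [], []
--     inside = False
--     for i, val in enumerate(mask):
--         if val and not inside:
--             starts.append(i)
--             inside = True
--         elif not val and inside:
--             ends.append(i - 1)
--             inside = False
--     if inside:
--         ends.append(len(mask) - 1)
--     return list(zip(starts, ends))
-- ===== SOURCE B (Python) =====
-- from itertools import groupby
--
-- def segment_bounds(mask):
--     # Find contiguous silent regions as (start_frame, end_frame), via run-length grouping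
--     bounds = []
--     idx = 0
--     for val, group in groupby(mask, key=bool):
--         length = sum(1 for _ in group)
--         if val:
--             bounds.append((idx, idx + length - 1))
--         idx += length
--     return bounds
-- ===== Notes on version B (the rewrite author's own statement) =====
-- stated objective: idiomatic
-- what changed: Replaces the explicit inside-flag transition tracking with itertools.groupby run-length grouping: maximal runs of equal truthiness are formed, a running index is advanced by each run's length, and true runs emit (idx, idx+length-1) directly.
import Mathlib
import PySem

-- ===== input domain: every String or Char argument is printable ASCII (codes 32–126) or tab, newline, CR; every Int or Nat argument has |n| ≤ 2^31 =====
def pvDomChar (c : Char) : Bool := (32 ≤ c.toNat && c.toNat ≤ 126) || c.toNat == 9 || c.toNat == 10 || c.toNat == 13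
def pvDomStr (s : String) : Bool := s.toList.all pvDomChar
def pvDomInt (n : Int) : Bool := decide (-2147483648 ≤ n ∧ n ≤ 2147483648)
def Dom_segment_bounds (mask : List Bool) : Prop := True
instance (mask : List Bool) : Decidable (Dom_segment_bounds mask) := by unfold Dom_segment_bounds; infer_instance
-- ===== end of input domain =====

-- B replaces A's inside-flag transition tracking with run-length grouping (itertools.groupby style); objective: idiomatic, same O(n) cost.


-- ===== PORT A =====
-- loop body of A: state = (starts, ends, inside)
def pvStepA (s : List Int × List Int × Bool) (p : Int × Bool) : List Int × List Int × Bool :=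
  if p.2 && !s.2.2 then (s.1 ++ [p.1], s.2.1, true)
  else if !p.2 && s.2.2 then (s.1, s.2.1 ++ [p.1 - 1], false)
  else s

def segment_bounds (mask : List Bool) : List (Int × Int) :=
  let st := (PySem.List.enumerate mask 0).foldl pvStepA ([], [], false)
  let ends := if st.2.2 then st.2.1 ++ [(mask.length : Int) - 1] else st.2.1
  st.1.zip ends

-- ===== PORT B =====
-- groupby: length of the maximal prefix run equal to v, and the remainder
def pvTakeRun (v : Bool) : List Bool → Nat × List Bool
  | [] => (0, [])
  | w :: t => if w == v then ((pvTakeRun v t).1 + 1, (pvTakeRun v t).2) else (0, w :: t)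

theorem pvTakeRun_len (v : Bool) (t : List Bool) : (pvTakeRun v t).2.length ≤ t.length := by
  induction t with
  | nil => simp [pvTakeRun]
  | cons w t ih =>
    by_cases h : w == v <;> simp [pvTakeRun, h] <;> omega

-- one groupby iteration per run: emit a bound for true runs, advance idx by the run length
def pvGroupsB (idx : Int) : List Bool → List (Int × Int)
  | [] => []
  | v :: t =>
    let n : Nat := (pvTakeRun v t).1 + 1
    (if v then [(idx, idx + (n : Int) - 1)] else []) ++ pvGroupsB (idx + (n : Int)) (pvTakeRun v t).2
termination_by t => t.length
decreasing_by
  have := pvTakeRun_len v t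
  simp; omega

def segment_bounds_alt (mask : List Bool) : List (Int × Int) := pvGroupsB 0 mask

-- ===== PRECONDITION & SPEC =====
def Spec_segment_bounds (mask : List Bool) (out : List (Int × Int)) : Prop := out = segment_bounds_alt mask
instance (mask : List Bool) (out : List (Int × Int)) : Decidable (Spec_segment_bounds mask out) := by unfold Spec_segment_bounds; infer_instance

-- ===== CLAIM (what is proved, stated in full; the proofs are below) =====
def Claim_equal_segment_bounds : Prop := ∀ (mask : List Bool), Dom_segment_bounds mask → Spec_segment_bounds mask (segment_bounds mask)

-- ===== LEMMAS AND PROOFS =====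

-- reference segmentation, one element at a time; specIn s i t: a segment opened at s, next index i
mutual
def specOut (i : Int) : List Bool → List (Int × Int)
  | [] => []
  | b :: t => if b then specIn i (i + 1) t else specOut (i + 1) t
def specIn (s i : Int) : List Bool → List (Int × Int)
  | [] => [(s, i - 1)]
  | b :: t => if b then specIn s (i + 1) t else (s, i - 1) :: specOut (i + 1) t
end

theorem specOut_run (t : List Bool) : ∀ (i : Int),
    specOut i t = specOut (i + ((pvTakeRun false t).1 : Int)) (pvTakeRun false t).2 := by
  induction t with
  | nil => simp [pvTakeRun]
  | cons w t ih =>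
    intro i
    cases w with
    | false =>
      have h1 : specOut i (false :: t) = specOut (i + 1) t := by simp [specOut]
      have h2 : pvTakeRun false (false :: t)
          = ((pvTakeRun false t).1 + 1, (pvTakeRun false t).2) := by simp [pvTakeRun]
      rw [h1, ih (i + 1), h2]
      congr 1
      push_cast; ring
    | true => simp [pvTakeRun]

theorem specIn_run (t : List Bool) : ∀ (s i : Int),
    specIn s i t = specIn s (i + ((pvTakeRun true t).1 : Int)) (pvTakeRun true t).2 := by
  induction t with
  | nil => simp [pvTakeRun]
  | cons w t ih =>
    intro s i
    cases w with
    | true =>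
      have h1 : specIn s i (true :: t) = specIn s (i + 1) t := by simp [specIn]
      have h2 : pvTakeRun true (true :: t)
          = ((pvTakeRun true t).1 + 1, (pvTakeRun true t).2) := by simp [pvTakeRun]
      rw [h1, ih s (i + 1), h2]
      congr 1
      push_cast; ring
    | false => simp [pvTakeRun]

theorem pvTakeRun_rest (v : Bool) (t : List Bool) :
    (pvTakeRun v t).2 = [] ∨ ∃ t', (pvTakeRun v t).2 = ((!v) :: t') := by
  induction t with
  | nil => simp [pvTakeRun]
  | cons w t ih =>
    by_cases h : w == v
    · simpa [pvTakeRun, h] using ih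
    · right
      refine ⟨t, ?_⟩
      have hw : w = !v := by cases w <;> cases v <;> simp_all
      simp only [pvTakeRun, if_neg h]
      rw [hw]

theorem pvGroupsB_eq_specOut : ∀ (t : List Bool) (i : Int), pvGroupsB i t = specOut i t
  | [], i => by simp [pvGroupsB, specOut]
  | v :: t, i => by
    have hlen := pvTakeRun_len v t
    have hrec := pvGroupsB_eq_specOut (pvTakeRun v t).2
    cases v with
    | false =>
      have h1 : specOut i (false :: t) = specOut (i + 1) t := by simp [specOut]
      rw [pvGroupsB, hrec, h1, specOut_run t (i + 1)]
      rw [if_neg (by decide : ¬ (false = true)), List.nil_append]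
      congr 1
      push_cast; ring
    | true =>
      have h1 : specOut i (true :: t) = specIn i (i + 1) t := by simp [specOut]
      rw [pvGroupsB, hrec, h1, specIn_run t i (i + 1)]
      rcases pvTakeRun_rest true t with h | ⟨t', h⟩ <;> rw [h] <;>
        simp [specIn, specOut] <;> push_cast <;> ring_nf <;> simp
termination_by t _ => t.length
decreasing_by simp; omega

-- the zip-with-final-fix A performs after its loop, as a function of the loop state
def pvPost (st : List Int × List Int × Bool) (N : Int) : List (Int × Int) :=
  st.1.zip (if st.2.2 then st.2.1 ++ [N - 1] else st.2.1)

theorem foldA_spec : ∀ (t : List Bool) (i N : Int) (S E : List Int),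
    S.length = E.length → N = i + (t.length : Int) →
    (pvPost ((PySem.List.enumerate t i).foldl pvStepA (S, E, false)) N
        = S.zip E ++ specOut i t)
    ∧ ∀ (s : Int),
      pvPost ((PySem.List.enumerate t i).foldl pvStepA (S ++ [s], E, true)) N
        = S.zip E ++ specIn s i t := by
  intro t
  induction t with
  | nil =>
    intro i N S E hlen hN
    constructor
    · simp [PySem.List.enumerate_nil, pvPost, specOut]
    · intro s
      have hN1 : N - 1 = i - 1 := by simp at hN; omega
      simp [PySem.List.enumerate_nil, pvPost, specIn, List.zip_append hlen, hN1]
  | cons b t ih =>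
    intro i N S E hlen hN
    have hN' : N = (i + 1) + (t.length : Int) := by
      simp only [List.length_cons] at hN; push_cast at hN; omega
    rw [PySem.List.enumerate_cons]
    constructor
    · cases b with
      | true =>
        have hstep : pvStepA (S, E, false) (i, true) = (S ++ [i], E, true) := by
          simp [pvStepA]
        rw [List.foldl_cons, hstep, (ih (i + 1) N S E hlen hN').2 i]
        simp [specOut]
      | false =>
        have hstep : pvStepA (S, E, false) (i, false) = (S, E, false) := by
          simp [pvStepA]
        rw [List.foldl_cons, hstep, (ih (i + 1) N S E hlen hN').1]
        simp [specOut]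
    · intro s
      cases b with
      | true =>
        have hstep : pvStepA (S ++ [s], E, true) (i, true) = (S ++ [s], E, true) := by
          simp [pvStepA]
        rw [List.foldl_cons, hstep, (ih (i + 1) N S E hlen hN').2 s]
        simp [specIn]
      | false =>
        have hstep : pvStepA (S ++ [s], E, true) (i, false)
            = (S ++ [s], E ++ [i - 1], false) := by simp [pvStepA]
        have hlen' : (S ++ [s]).length = (E ++ [i - 1]).length := by simp [hlen]
        rw [List.foldl_cons, hstep, (ih (i + 1) N (S ++ [s]) (E ++ [i - 1]) hlen' hN').1]
        rw [List.zip_append hlen]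
        simp [specIn]

-- ===== VERDICT (by name: the statement is the Claim_ definition above) =====
theorem segment_bounds_spec : Claim_equal_segment_bounds := by
  intro mask _
  show segment_bounds mask = segment_bounds_alt mask
  have h := (foldA_spec mask 0 (mask.length : Int) [] [] rfl (by simp)).1
  simp only [List.zip_nil_left, List.nil_append] at h
  rw [segment_bounds_alt, pvGroupsB_eq_specOut, ← h]
  simp [segment_bounds, pvPost]
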